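-- pv_equiv track=rewrite | github.com/grokit/dcore | apps/dnotes/commands/ns_hist.py | compute_repetition
-- ===== SOURCE A (Python) =====
-- def compute_repetition(filelist):
--     mem = {}
--     for ff in filelist:
--         if ff not in mem:
--             mem[ff] = 0
--         mem[ff] += 1
--
--     out = []
--     for ff, rep in mem.items():
--         out.append((rep, ff))
--     out.sort(key=lambda x: x[0], reverse=True)
--     return out
-- ===== SOURCE B (Python) =====
-- def compute_repetition(filelist):
--     mem = {}
--     for ff in filelist:
--         mem[ff] = mem.get(ff, 0) + 1
--     if not mem:
--         return []
--     buckets = {}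
--     for ff, rep in mem.items():
--         buckets.setdefault(rep, []).append((rep, ff))
--     out = []
--     for c in range(max(buckets), 0, -1):
--         out.extend(buckets.get(c, []))
--     return out
-- ===== Notes on version B (the rewrite author's own statement) =====
-- stated objective: alternative
-- what changed: B replaces A's comparison sort of (count, file) pairs by a bucket/counting pass: tuples are grouped into a dict keyed by count while iterating the counter in insertion order, then emitted from the maximum count down to 1, reproducing the stable descending sort exactly without comparison sorting.
import Mathlib
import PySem

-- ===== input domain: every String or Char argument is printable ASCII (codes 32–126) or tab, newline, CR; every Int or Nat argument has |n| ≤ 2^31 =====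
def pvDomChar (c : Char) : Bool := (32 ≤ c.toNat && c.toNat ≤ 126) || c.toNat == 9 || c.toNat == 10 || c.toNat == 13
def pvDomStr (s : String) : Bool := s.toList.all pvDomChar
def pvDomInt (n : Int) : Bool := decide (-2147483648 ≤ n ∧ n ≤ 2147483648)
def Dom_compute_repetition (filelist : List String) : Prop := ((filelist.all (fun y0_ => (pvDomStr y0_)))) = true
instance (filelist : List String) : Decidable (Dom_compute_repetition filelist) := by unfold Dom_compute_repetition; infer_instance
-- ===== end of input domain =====

-- B replaces A's comparison sort by a counting/bucket pass (buckets keyed by count, emitted from the maximum count down); alternative algorithm, same results.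

-- ===== PORT A =====
def compute_repetition (filelist : List String) : List (Int × String) :=
  let mem := filelist.foldl (fun d ff =>
      let d' := if d.contains ff then d else d.insert ff (0 : Int)
      d'.insert ff (d'.getD ff 0 + 1)) PySem.Dict.empty
  let out := mem.items.foldl (fun acc p => acc ++ [((p.2 : Int), p.1)]) ([] : List (Int × String))
  PySem.List.sorted out (fun x => x.1) true

-- ===== PORT B =====
def compute_repetition_alt (filelist : List String) : List (Int × String) :=
  let mem := filelist.foldl (fun d ff => d.insert ff (d.getD ff 0 + 1))
      (PySem.Dict.empty : PySem.Dict String Int)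
  if mem.items = [] then []
  else
    let buckets := mem.items.foldl
      (fun b p => b.modify p.2 ([] : List (Int × String)) (fun l => l ++ [((p.2 : Int), p.1)]))
      PySem.Dict.empty
    let maxc := (PySem.List.max? buckets.keys (fun x => x)).getD 0
    (PySem.List.pyRange maxc 0 (-1)).foldl (fun acc c => acc ++ buckets.getD c []) []

-- ===== PRECONDITION & SPEC =====
def Spec_compute_repetition (filelist : List String) (out : List (Int × String)) : Prop := out = compute_repetition_alt filelist
instance (filelist : List String) (out : List (Int × String)) : Decidable (Spec_compute_repetition filelist out) := by unfold Spec_compute_repetition; infer_instance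

-- ===== CLAIM (what is proved, stated in full; the proofs are below) =====
def Claim_equal_compute_repetition : Prop := ∀ (filelist : List String), Dom_compute_repetition filelist → Spec_compute_repetition filelist (compute_repetition filelist)

-- ===== LEMMAS AND PROOFS =====

-- A's counting loop ("if absent, set 0, then += 1") is the same dict step as B's get-or-0 plus 1.
theorem stepA_eq :
    (fun (d : PySem.Dict String Int) ff =>
      let d' := if d.contains ff then d else d.insert ff (0 : Int)
      d'.insert ff (d'.getD ff 0 + 1))
    = (fun (d : PySem.Dict String Int) ff => d.insert ff (d.getD ff 0 + 1)) := by
  funext d ff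
  by_cases h : d.contains ff = true
  · simp [h]
  · simp only [Bool.not_eq_true] at h
    simp [h, PySem.Dict.insert_insert_self, PySem.Dict.getD_insert_self,
      PySem.Dict.getD_of_not_contains _ _ h]

theorem pyRange_neg_one (M : Int) :
    PySem.List.pyRange M 0 (-1) = (List.range M.toNat).map (fun k : Nat => (M - (k:Int))) := by
  unfold PySem.List.pyRange
  by_cases h : 0 < M
  · simp only [if_neg (by norm_num : ¬ ((-1 : Int) = 0))]
    norm_num [h]
    intro k _
    ring
  · simp only [if_neg (by norm_num : ¬ ((-1 : Int) = 0))]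
    norm_num [h]
    have h0 : M.toNat = 0 := by omega
    simp
    omega

theorem range_map_sub_pairwise (M : Int) (n : Nat) :
    ((List.range n).map (fun k : Nat => (M - (k:Int)))).Pairwise (· > ·) := by
  refine List.Pairwise.map _ ?_ List.pairwise_lt_range
  intro a b hab
  simp only [gt_iff_lt]
  omega

theorem mem_range_map_sub (M c : Int) (h1 : 1 ≤ c) (h2 : c ≤ M) :
    c ∈ (List.range M.toNat).map (fun k : Nat => (M - (k:Int))) := by
  simp only [List.mem_map, List.mem_range]
  exact ⟨(M - c).toNat, by omega, by omega⟩

theorem insertBy_append {α : Type} (before : α → α → Bool) (x : α) (as bs : List α)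
    (h : ∀ a ∈ as, before x a = false) :
    PySem.List.insertBy before x (as ++ bs) = as ++ PySem.List.insertBy before x bs := by
  induction as with
  | nil => simp
  | cons a as ih =>
    simp only [List.cons_append, PySem.List.insertBy, h a (by simp)]
    simp only [Bool.false_eq_true, if_false, List.cons.injEq, true_and]
    exact ih (fun a ha => h a (by simp [ha]))

theorem insertBy_front {α : Type} (before : α → α → Bool) (x : α) (bs : List α)
    (h : ∀ b ∈ bs, before x b = true) :
    PySem.List.insertBy before x bs = x :: bs := by
  cases bs with
  | nil => rfl
  | cons b bs => simp [PySem.List.insertBy, h b (by simp)]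

theorem key_of_mem_filter (L : List (Int × String)) (c : Int) (q : Int × String)
    (h : q ∈ L.filter (fun p => p.1 == c)) : q.1 = c := by
  have := List.of_mem_filter h
  simpa using this

-- inserting one element into the descending bucket concatenation puts it at the end of its own bucket
theorem ins_buckets (ks : List Int) (x : Int × String) (L : List (Int × String))
    (hs : ks.Pairwise (· > ·)) (hx : x.1 ∈ ks) :
    PySem.List.insertBy (fun a b => decide (b.1 < a.1)) x
      (ks.flatMap (fun c => L.filter (fun p => p.1 == c)))
    = ks.flatMap (fun c => (L ++ [x]).filter (fun p => p.1 == c)) := by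
  induction ks with
  | nil => simp at hx
  | cons c ks ih =>
    have hgt : ∀ c' ∈ ks, c > c' := fun c' hc' => (List.pairwise_cons.mp hs).1 c' hc'
    have htail : ks.Pairwise (· > ·) := (List.pairwise_cons.mp hs).2
    simp only [List.flatMap_cons]
    rcases List.mem_cons.mp hx with hxc | hxks
    · -- x belongs to the head bucket
      have hAfilter : (L ++ [x]).filter (fun p => p.1 == c)
          = L.filter (fun p => p.1 == c) ++ [x] := by
        simp [List.filter_append, hxc]
      have htailfilter : ks.flatMap (fun c' => (L ++ [x]).filter (fun p => p.1 == c'))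
          = ks.flatMap (fun c' => L.filter (fun p => p.1 == c')) := by
        refine List.flatMap_congr ?_
        intro c' hc'
        have hne : x.1 ≠ c' := by have := hgt c' hc'; omega
        simp [List.filter_append, hne]
      rw [insertBy_append _ _ _ _ (by
        intro a ha
        have ha1 : a.1 = c := key_of_mem_filter L c a ha
        simp [ha1, hxc])]
      rw [insertBy_front _ _ _ (by
        intro b hb
        rcases List.mem_flatMap.mp hb with ⟨c', hc', hbf⟩
        have hb1 : b.1 = c' := key_of_mem_filter L c' b hbf
        have := hgt c' hc'
        simp only [hb1, decide_eq_true_eq]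
        omega)]
      rw [hAfilter, htailfilter]
      simp
    · -- x belongs to a later bucket
      have hcx : c > x.1 := hgt x.1 hxks
      have hheadfilter : (L ++ [x]).filter (fun p => p.1 == c)
          = L.filter (fun p => p.1 == c) := by
        have hne : x.1 ≠ c := by omega
        simp [List.filter_append, hne]
      rw [insertBy_append _ _ _ _ (by
        intro a ha
        have ha1 : a.1 = c := key_of_mem_filter L c a ha
        simp only [ha1, decide_eq_false_iff_not]
        omega)]
      rw [ih htail hxks, hheadfilter]

-- stable insertion sort (reverse=True) equals the descending bucket concatenation
theorem foldl_insertBy_eq_buckets (ks : List Int) (hs : ks.Pairwise (· > ·)) :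
    ∀ L : List (Int × String), (∀ p ∈ L, p.1 ∈ ks) →
    L.foldl (fun acc x => PySem.List.insertBy (fun a b => decide (b.1 < a.1)) x acc) []
      = ks.flatMap (fun c => L.filter (fun p => p.1 == c)) := by
  intro L
  induction L using List.reverseRecOn with
  | nil => simp
  | append_singleton L x ih =>
    intro h
    rw [List.foldl_append, List.foldl_cons, List.foldl_nil]
    rw [ih (fun p hp => h p (by simp [hp]))]
    exact ins_buckets ks x L hs (h x (by simp))

theorem max?_isSome_of_ne_nil {α : Type} (xs : List α) (key : α → Int) (h : xs ≠ []) :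
    (PySem.List.max? xs key).isSome = true := by
  cases xs with
  | nil => exact absurd rfl h
  | cons a t =>
    unfold PySem.List.max?
    rw [List.foldl_cons]
    clear h
    induction t generalizing a with
    | nil => simp
    | cons b t ih =>
      rw [List.foldl_cons]
      by_cases hb : key a < key b <;> simp only [hb, if_pos] <;>
        first
          | exact ih b
          | exact ih a
      
-- the value of each bucket built by B's grouping loop
theorem buckets_getD (items : List (String × Int)) (c : Int) :
    (items.foldl
      (fun b p => b.modify p.2 ([] : List (Int × String)) (fun l => l ++ [((p.2 : Int), p.1)]))
      PySem.Dict.empty).getD c []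
    = (items.map (fun p => ((p.2 : Int), p.1))).filter (fun p => p.1 == c) := by
  have hfm : items.foldl
      (fun b p => b.modify p.2 ([] : List (Int × String)) (fun l => l ++ [((p.2 : Int), p.1)]))
      PySem.Dict.empty
    = (items.map (fun p => ((p.2 : Int), ((p.2 : Int), p.1)))).foldl
      (fun b q => b.modify q.1 ([] : List (Int × String)) (fun l => l ++ [q.2]))
      PySem.Dict.empty := by
    rw [List.foldl_map]
  rw [hfm, PySem.Dict.getD_foldl_modify_append]
  simp only [PySem.Dict.getD_empty, List.nil_append]
  rw [List.filter_map, List.filter_map, List.map_map]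
  rfl

theorem buckets_keys (items : List (String × Int)) :
    (items.foldl
      (fun b p => b.modify p.2 ([] : List (Int × String)) (fun l => l ++ [((p.2 : Int), p.1)]))
      PySem.Dict.empty).keys
    = PySem.Set.ofList (items.map (fun p => p.2)) := by
  rw [PySem.Dict.keys_foldl_modify_key items (fun p => p.2) ([] : List (Int × String))
    (fun _ p => fun l => l ++ [((p.2 : Int), p.1)]) PySem.Dict.empty]
  simp [PySem.Dict.keys_empty, PySem.Set.update_nil_left]

-- ===== VERDICT (by name: the statement is the Claim_ definition above) =====
theorem compute_repetition_spec : Claim_equal_compute_repetition := by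
  intro filelist _
  show compute_repetition filelist = compute_repetition_alt filelist
  unfold compute_repetition compute_repetition_alt
  simp only [stepA_eq, PySem.Dict.foldl_insert_getD_add_one_eq_counter]
  cases hfl : filelist with
  | nil => rfl
  | cons a t =>
    have hitems : (PySem.Dict.counter (a :: t)).items
        = (PySem.Set.ofList (a :: t)).map (fun k => (k, (List.count k (a :: t) : Int))) :=
      PySem.Dict.items_counter (a :: t)
    have hne : (PySem.Dict.counter (a :: t)).items ≠ [] := by
      rw [hitems, PySem.Set.ofList_cons]
      simp
    rw [if_neg hne]
    set items := (PySem.Dict.counter (a :: t)).items with hitems_def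
    set L := items.map (fun p => ((p.2 : Int), p.1)) with hL
    -- A's output list before sorting is L
    rw [PySem.List.foldl_append_singleton_eq_map, List.nil_append]
    -- B's buckets
    set buckets := items.foldl
      (fun b p => b.modify p.2 ([] : List (Int × String)) (fun l => l ++ [((p.2 : Int), p.1)]))
      PySem.Dict.empty with hbuckets
    have hkeys : buckets.keys = PySem.Set.ofList (items.map (fun p => p.2)) := buckets_keys items
    have hkeysne : buckets.keys ≠ [] := by
      rw [hkeys]
      intro hcontra
      have : items.map (fun p => p.2) = [] := by
        by_contra hne2
        rcases List.exists_mem_of_ne_nil _ hne2 with ⟨y, hy⟩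
        have : y ∈ PySem.Set.ofList (items.map (fun p => p.2)) := (PySem.Set.mem_ofList _ _).mpr hy
        simp [hcontra] at this
      simp [List.map_eq_nil_iff] at this
      exact hne this
    obtain ⟨m, hm⟩ := Option.isSome_iff_exists.mp (max?_isSome_of_ne_nil buckets.keys (fun x => x) hkeysne)
    rw [hm]
    simp only [Option.getD_some]
    -- bound the keys of L
    have hbound : ∀ p ∈ L, 1 ≤ p.1 ∧ p.1 ≤ m := by
      intro p hp
      rcases List.mem_map.mp hp with ⟨q, hq, rfl⟩
      have hq2 : q.2 ∈ items.map (fun p => p.2) := List.mem_map.mpr ⟨q, hq, rfl⟩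
      have hqk : q.2 ∈ buckets.keys := by
        rw [hkeys]; exact (PySem.Set.mem_ofList _ _).mpr hq2
      have hle : (q.2 : Int) ≤ m := PySem.List.max?_isMax hm _ hqk
      constructor
      · -- q.2 is a positive count
        rw [hitems_def, PySem.Dict.items_counter] at hq
        rcases List.mem_map.mp hq with ⟨k, hk, rfl⟩
        have hkmem : k ∈ (a :: t) := (PySem.Set.mem_ofList _ _).mp hk
        have := List.count_pos_iff.mpr hkmem
        simp only []
        omega
      · exact hle
    -- the bucket-emitting loop is the flatMap of the buckets
    rw [PySem.List.foldl_append_eq_flatMap, List.nil_append]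
    have hflat : (PySem.List.pyRange m 0 (-1)).flatMap (fun c => buckets.getD c [])
        = (PySem.List.pyRange m 0 (-1)).flatMap (fun c => L.filter (fun p => p.1 == c)) := by
      refine List.flatMap_congr ?_
      intro c _
      rw [hbuckets, buckets_getD, ← hL]
    rw [hflat, pyRange_neg_one]
    rw [PySem.List.sorted_rev_eq_foldl_insertBy]
    exact foldl_insertBy_eq_buckets _ (range_map_sub_pairwise m m.toNat) L
      (fun p hp => mem_range_map_sub m p.1 (hbound p hp).1 (hbound p hp).2)
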